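-- pv_equiv track=rewrite | github.com/Auceane/BUTinfo1_SAE_1.02-Comparaison_d.approches_algorithmiques | Partie 2/biology.py | decoupe_sequence
-- ===== SOURCE A (Python) =====
-- def decoupe_sequence(seq,start,stop):
--     '''
--        Prend en paramètre trois tableaux seq, start et stop.
--        La fonction doit découper le tableau seq en séquences et retourner un tableau contenant
--        les différents morceaux.
--     '''
--     t=[]
--     i=0
--     while i<len(seq):
--         p=[]
--         if seq[i] in start:
--             i+=1
--             while i<len(seq) and seq[i] not in stop:
--
--                 p.append(seq[i])
--                 i+=1
--             t.append(p)
--         i+=1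
--     return t
-- ===== SOURCE B (Python) =====
-- def decoupe_sequence(seq, start, stop):
--     t = []
--     inside = False
--     p = []
--     for x in seq:
--         if not inside:
--             if x in start:
--                 inside = True
--                 p = []
--         else:
--             if x in stop:
--                 t.append(p)
--                 inside = False
--             else:
--                 p.append(x)
--     if inside:
--         t.append(p)
--     return t
-- ===== Notes on version B (the rewrite author's own statement) =====
-- stated objective: simpler
-- what changed: Replaces A's index-based outer/inner nested while loops with a single for-each pass over seq maintaining an inside/outside state flag and the current chunk.
import Mathlib
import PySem

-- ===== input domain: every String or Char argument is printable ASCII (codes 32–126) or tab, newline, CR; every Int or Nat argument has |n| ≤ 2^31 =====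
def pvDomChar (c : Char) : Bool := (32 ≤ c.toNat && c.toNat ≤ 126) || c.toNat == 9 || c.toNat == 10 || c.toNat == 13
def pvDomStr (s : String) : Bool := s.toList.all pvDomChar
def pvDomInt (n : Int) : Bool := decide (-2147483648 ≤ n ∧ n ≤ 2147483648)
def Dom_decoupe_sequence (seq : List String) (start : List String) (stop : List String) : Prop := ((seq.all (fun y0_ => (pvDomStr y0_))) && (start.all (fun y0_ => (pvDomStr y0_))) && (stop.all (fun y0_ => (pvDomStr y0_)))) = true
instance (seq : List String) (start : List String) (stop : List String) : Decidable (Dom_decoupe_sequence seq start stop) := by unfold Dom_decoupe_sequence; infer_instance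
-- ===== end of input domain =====

-- B rewrites A's index-based nested while loops as one for-each pass with an inside/outside flag (objective: simpler).

-- ===== PORT A =====
-- inner while: starting at index i, collect elements until one in stop (or end); returns (p, final i)
def pvInnerA (seq stop : List String) (i : Nat) : List String × Nat :=
  if h : i < seq.length then
    if seq[i] ∈ stop then ([], i)
    else
      let r := pvInnerA seq stop (i + 1)
      (seq[i] :: r.1, r.2)
  else ([], i)
termination_by seq.length - i

-- needed for pvOuterA's termination
theorem pvInnerA_ge (seq stop : List String) (i : Nat) : i ≤ (pvInnerA seq stop i).2 := by
  unfold pvInnerA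
  split
  · split
    · simp
    · have := pvInnerA_ge seq stop (i + 1)
      simpa using Nat.le_trans (Nat.le_succ i) this
  · simp
termination_by seq.length - i

-- outer while of A
def pvOuterA (seq start stop : List String) (i : Nat) : List (List String) :=
  if h : i < seq.length then
    if seq[i] ∈ start then
      (pvInnerA seq stop (i + 1)).1 :: pvOuterA seq start stop ((pvInnerA seq stop (i + 1)).2 + 1)
    else pvOuterA seq start stop (i + 1)
  else []
termination_by seq.length - i
decreasing_by
  · have := pvInnerA_ge seq stop (i + 1); omega
  · omega

def decoupe_sequence (seq : List String) (start : List String) (stop : List String) : List (List String) :=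
  pvOuterA seq start stop 0

-- ===== PORT B =====
-- state: (current open chunk if inside, chunks so far)
def pvStepB (start stop : List String) (st : Option (List String) × List (List String)) (x : String) : Option (List String) × List (List String) :=
  match st with
  | (none, acc) => if x ∈ start then (some [], acc) else (none, acc)
  | (some p, acc) => if x ∈ stop then (none, acc ++ [p]) else (some (p ++ [x]), acc)

-- final flush of a still-open chunk
def pvFinishB (st : Option (List String) × List (List String)) : List (List String) :=
  match st with
  | (none, acc) => acc
  | (some p, acc) => acc ++ [p]

def decoupe_sequence_alt (seq : List String) (start : List String) (stop : List String) : List (List String) :=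
  pvFinishB (seq.foldl (pvStepB start stop) (none, []))

-- ===== PRECONDITION & SPEC =====
def Spec_decoupe_sequence (seq : List String) (start : List String) (stop : List String) (out : List (List String)) : Prop := out = decoupe_sequence_alt seq start stop
instance (seq : List String) (start : List String) (stop : List String) (out : List (List String)) : Decidable (Spec_decoupe_sequence seq start stop out) := by unfold Spec_decoupe_sequence; infer_instance

-- ===== CLAIM (what is proved, stated in full; the proofs are below) =====
def Claim_equal_decoupe_sequence : Prop := ∀ (seq : List String) (start : List String) (stop : List String), Dom_decoupe_sequence seq start stop → Spec_decoupe_sequence seq start stop (decoupe_sequence seq start stop)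

-- ===== LEMMAS AND PROOFS =====

-- one-step unfoldings of A's loops
theorem pvInnerA_stop (seq stop : List String) (i : Nat) (h : i < seq.length) (hx : seq[i] ∈ stop) :
    pvInnerA seq stop i = ([], i) := by rw [pvInnerA]; simp [h, hx]

theorem pvInnerA_go (seq stop : List String) (i : Nat) (h : i < seq.length) (hx : seq[i] ∉ stop) :
    pvInnerA seq stop i = (seq[i] :: (pvInnerA seq stop (i + 1)).1, (pvInnerA seq stop (i + 1)).2) := by
  rw [pvInnerA]; simp [h, hx]

theorem pvInnerA_end (seq stop : List String) (i : Nat) (h : ¬ i < seq.length) :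
    pvInnerA seq stop i = ([], i) := by rw [pvInnerA]; simp [h]

theorem pvOuterA_start (seq start stop : List String) (i : Nat) (h : i < seq.length) (hx : seq[i] ∈ start) :
    pvOuterA seq start stop i =
      (pvInnerA seq stop (i + 1)).1 :: pvOuterA seq start stop ((pvInnerA seq stop (i + 1)).2 + 1) := by
  rw [pvOuterA]; simp [h, hx]

theorem pvOuterA_skip (seq start stop : List String) (i : Nat) (h : i < seq.length) (hx : seq[i] ∉ start) :
    pvOuterA seq start stop i = pvOuterA seq start stop (i + 1) := by
  rw [pvOuterA]; simp [h, hx]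

theorem pvOuterA_end (seq start stop : List String) (i : Nat) (h : ¬ i < seq.length) :
    pvOuterA seq start stop i = [] := by rw [pvOuterA]; simp [h]

-- the accumulator factors out of the fold
theorem pvAcc (start stop : List String) (l : List String) (o : Option (List String)) (acc : List (List String)) :
    pvFinishB (l.foldl (pvStepB start stop) (o, acc)) = acc ++ pvFinishB (l.foldl (pvStepB start stop) (o, [])) := by
  induction l generalizing o acc with
  | nil => cases o <;> simp [pvFinishB]
  | cons x xs ih =>
    cases o with
    | none =>
      by_cases hx : x ∈ start
      · simp only [List.foldl_cons, pvStepB, if_pos hx]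
        exact ih (some []) acc
      · simp only [List.foldl_cons, pvStepB, if_neg hx]
        exact ih none acc
    | some p =>
      by_cases hx : x ∈ stop
      · simp only [List.foldl_cons, pvStepB, if_pos hx]
        rw [ih none (acc ++ [p]), ih none ([] ++ [p])]
        simp
      · simp only [List.foldl_cons, pvStepB, if_neg hx]
        exact ih (some (p ++ [x])) acc

-- an open-state fold over drop i closes exactly at pvInnerA's stopping point
theorem pvOpen (seq start stop : List String) (i : Nat) (p0 : List String) (acc : List (List String)) :
    pvFinishB ((seq.drop i).foldl (pvStepB start stop) (some p0, acc)) =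
      pvFinishB ((seq.drop ((pvInnerA seq stop i).2 + 1)).foldl (pvStepB start stop)
        (none, acc ++ [p0 ++ (pvInnerA seq stop i).1])) := by
  by_cases h : i < seq.length
  · rw [List.drop_eq_getElem_cons h]
    by_cases hx : seq[i] ∈ stop
    · rw [pvInnerA_stop seq stop i h hx]
      simp only [List.foldl_cons, pvStepB, if_pos hx]
      simp
    · have hrec := pvOpen seq start stop (i + 1) (p0 ++ [seq[i]]) acc
      rw [pvInnerA_go seq stop i h hx]
      simp only [List.foldl_cons, pvStepB, if_neg hx]
      rw [hrec]
      simp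
  · have hd : seq.drop i = [] := List.drop_eq_nil_of_le (Nat.le_of_not_lt h)
    have hd2 : seq.drop (i + 1) = [] := List.drop_eq_nil_of_le (by omega)
    rw [pvInnerA_end seq stop i h]
    simp [hd, hd2, pvFinishB]
termination_by seq.length - i
decreasing_by omega

-- main invariant: A's outer loop from i equals B's fold over the remaining suffix
theorem pvMain (seq start stop : List String) (i : Nat) :
    pvOuterA seq start stop i = pvFinishB ((seq.drop i).foldl (pvStepB start stop) (none, [])) := by
  by_cases h : i < seq.length
  · rw [List.drop_eq_getElem_cons h]
    by_cases hx : seq[i] ∈ start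
    · have hge := pvInnerA_ge seq stop (i + 1)
      have hrec := pvMain seq start stop ((pvInnerA seq stop (i + 1)).2 + 1)
      rw [pvOuterA_start seq start stop i h hx]
      simp only [List.foldl_cons, pvStepB, if_pos hx]
      rw [pvOpen seq start stop (i + 1) [] [], pvAcc, ← hrec]
      simp
    · have hrec := pvMain seq start stop (i + 1)
      rw [pvOuterA_skip seq start stop i h hx]
      simp only [List.foldl_cons, pvStepB, if_neg hx]
      exact hrec
  · have hd : seq.drop i = [] := List.drop_eq_nil_of_le (Nat.le_of_not_lt h)
    rw [pvOuterA_end seq start stop i h]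
    simp [hd, pvFinishB]
termination_by seq.length - i
decreasing_by
  · have := pvInnerA_ge seq stop (i + 1); omega
  · omega

-- ===== VERDICT (by name: the statement is the Claim_ definition above) =====
theorem decoupe_sequence_spec : Claim_equal_decoupe_sequence := by
  intro seq start stop _
  unfold Spec_decoupe_sequence decoupe_sequence decoupe_sequence_alt
  simpa using pvMain seq start stop 0
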